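-- pv_equiv track=rewrite | github.com/aversiyava/roomDataSheet | infoToRooms.py | stringForNamesList
-- ===== SOURCE A (Python) =====
-- from itertools import groupby
--
-- def stringForNamesList(listToSplit):
--     ordering = sorted(listToSplit)
--     elementsGroup = []
--     for key, group in groupby(ordering):
--         elementsGroup.append(list(group))
--     stringList = []
--     for i in range(len(elementsGroup)):
--         numberElements = str(len(elementsGroup[i])) + " x " + elementsGroup[i][0]
--         stringList.append(numberElements)
--     completeString = " / ".join(stringList)
--     return completeString
-- ===== SOURCE B (Python) =====
-- def stringForNamesList(listToSplit):
--     counts = {}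
--     for name in listToSplit:
--         counts[name] = counts.get(name, 0) + 1
--     return " / ".join(str(counts[key]) + " x " + key for key in sorted(counts))
-- ===== Notes on version B (the rewrite author's own statement) =====
-- stated objective: simpler
-- what changed: Replaces sort-the-whole-list + itertools.groupby run-grouping + an index loop by a single frequency-dict pass followed by sorting only the distinct keys.
import Mathlib
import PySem

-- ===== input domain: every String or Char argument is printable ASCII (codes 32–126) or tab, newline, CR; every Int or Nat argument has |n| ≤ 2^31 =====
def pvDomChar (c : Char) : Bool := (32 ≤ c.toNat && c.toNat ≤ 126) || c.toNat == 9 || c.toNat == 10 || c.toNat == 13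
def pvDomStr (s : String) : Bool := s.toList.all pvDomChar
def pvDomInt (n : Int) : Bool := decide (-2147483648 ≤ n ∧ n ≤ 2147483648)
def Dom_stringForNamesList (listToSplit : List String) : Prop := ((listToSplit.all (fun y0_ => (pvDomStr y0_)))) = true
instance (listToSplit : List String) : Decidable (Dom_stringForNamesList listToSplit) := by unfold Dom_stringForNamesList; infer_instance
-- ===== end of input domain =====

-- B replaces A's sort + itertools.groupby run-grouping + index loop by a frequency
-- dict built in one pass followed by sorting only the distinct keys (objective: simpler).

-- ===== PORT A =====
-- itertools.groupby with no key on a list of strings: the list of maximal runs of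
-- consecutive equal elements, in order (A materialises each group with list(group)).
def pvGroupRuns : List String → List (List String)
  | [] => []
  | x :: xs =>
      (x :: xs.takeWhile (· == x)) :: pvGroupRuns (xs.dropWhile (· == x))
  termination_by l => l.length
  decreasing_by
    simp only [List.length_cons]
    exact Nat.lt_succ_of_le (List.Sublist.length_le (List.dropWhile_sublist _))

def stringForNamesList (listToSplit : List String) : String :=
  let ordering := PySem.List.sorted listToSplit (fun x => x) false
  let elementsGroup := pvGroupRuns ordering
  -- 'for i in range(len(elementsGroup)): … elementsGroup[i] …'; groups are nonempty,
  -- so the pyGetD defaults are never read (totalisation only)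
  let stringList := (PySem.List.pyRange 0 (PySem.List.len elementsGroup) 1).foldl
    (fun acc i =>
      acc ++ [PySem.Int.toStr (PySem.List.len (PySem.List.pyGetD elementsGroup i [])) ++ " x "
                ++ PySem.List.pyGetD (PySem.List.pyGetD elementsGroup i []) 0 ""]) []
  PySem.Str.join " / " stringList

-- ===== PORT B =====
def stringForNamesList_alt (listToSplit : List String) : String :=
  let counts := listToSplit.foldl
    (fun d name => d.insert name (d.getD name 0 + 1)) (PySem.Dict.empty : PySem.Dict String Int)
  PySem.Str.join " / "
    ((PySem.List.sorted counts.keys (fun x => x) false).map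
      (fun key => PySem.Int.toStr (counts.getD key 0) ++ " x " ++ key))

-- ===== PRECONDITION & SPEC =====
def Spec_stringForNamesList (listToSplit : List String) (out : String) : Prop := out = stringForNamesList_alt listToSplit
instance (listToSplit : List String) (out : String) : Decidable (Spec_stringForNamesList listToSplit out) := by unfold Spec_stringForNamesList; infer_instance

-- ===== CLAIM (what is proved, stated in full; the proofs are below) =====
def Claim_equal_stringForNamesList : Prop := ∀ (listToSplit : List String), Dom_stringForNamesList listToSplit → Spec_stringForNamesList listToSplit (stringForNamesList listToSplit)

-- ===== LEMMAS AND PROOFS =====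

-- In a sorted list whose head bounds everything below, the initial run of the head
-- collects every copy of it.
lemma pv_run_split (x : String) (xs : List String)
    (hx : ∀ y ∈ xs, x ≤ y) (hs : xs.Pairwise (· ≤ ·)) :
    xs.takeWhile (· == x) = List.replicate (xs.count x) x ∧ x ∉ xs.dropWhile (· == x) := by
  induction xs with
  | nil => simp
  | cons y t ih =>
    by_cases hyx : y = x
    · subst hyx
      have ht := ih (fun z hz => hx z (List.mem_cons_of_mem _ hz)) hs.of_cons
      simp [List.count_cons_self, List.replicate_succ, ht.1, ht.2]
    · have hxy : x < y := lt_of_le_of_ne (hx y (List.mem_cons_self)) (Ne.symm hyx)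
      have hnot : x ∉ y :: t := by
        intro hmem
        rcases List.mem_cons.mp hmem with h | h
        · exact hyx h.symm
        · have := (List.pairwise_cons.mp hs).1 x h
          exact absurd this (not_le.mpr hxy)
      have hcount : (y :: t).count x = 0 := List.count_eq_zero.mpr hnot
      have hbeq : (y == x) = false := by simp [hyx]
      constructor
      · simp [hbeq, hcount]
      · simpa [List.dropWhile_cons, hbeq] using hnot

-- Characterisation of A's grouping on a sorted list: the runs are the multiplicity
-- blocks of a strictly increasing list of keys covering exactly the elements.
lemma pv_groupRuns_spec : ∀ (s : List String), s.Pairwise (· ≤ ·) →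
    ∃ ks : List String,
      pvGroupRuns s = ks.map (fun k => List.replicate (s.count k) k) ∧
      ks.Pairwise (· < ·) ∧ (∀ k, k ∈ ks ↔ k ∈ s)
  | [], _ => ⟨[], by simp [pvGroupRuns]⟩
  | x :: xs, hs => by
    have hx : ∀ y ∈ xs, x ≤ y := (List.pairwise_cons.mp hs).1
    have hxs : xs.Pairwise (· ≤ ·) := (List.pairwise_cons.mp hs).2
    obtain ⟨htake, hxd⟩ := pv_run_split x xs hx hxs
    set d := xs.dropWhile (· == x) with hd
    have hdsub : d.Sublist xs := List.dropWhile_sublist _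
    have hdp : d.Pairwise (· ≤ ·) := hxs.sublist hdsub
    obtain ⟨ks, hmap, hlt, hmem⟩ := pv_groupRuns_spec d hdp
    have hsplit : xs = List.replicate (xs.count x) x ++ d := by
      conv_lhs => rw [← List.takeWhile_append_dropWhile (p := (· == x)) (l := xs)]
      rw [htake]
    -- counts of keys other than x are unchanged from d to x :: xs
    have hcnt : ∀ k ∈ ks, (x :: xs).count k = d.count k := by
      intro k hk
      have hkx : k ≠ x := by
        intro h; exact hxd (h ▸ (hmem k).mp hk)
      rw [hsplit]
      simp [List.count_replicate, Ne.symm hkx]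
    refine ⟨x :: ks, ?_, ?_, ?_⟩
    · rw [pvGroupRuns, ← hd, htake, hmap, List.map_cons, List.count_cons_self,
          List.replicate_succ]
      congr 1
      exact (List.map_congr_left fun k hk => by rw [hcnt k hk]).symm
    · refine List.pairwise_cons.mpr ⟨?_, hlt⟩
      intro k hk
      have hkd : k ∈ d := (hmem k).mp hk
      have hkxs : k ∈ xs := hdsub.mem hkd
      have hkx : k ≠ x := fun h => hxd (h ▸ hkd)
      exact lt_of_le_of_ne (hx k hkxs) hkx.symm
    · intro k
      simp only [List.mem_cons, hmem]
      constructor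
      · rintro (h | h)
        · exact Or.inl h
        · exact Or.inr (hdsub.mem h)
      · rintro (h | h)
        · exact Or.inl h
        · rw [hsplit] at h
          rcases List.mem_append.mp h with h | h
          · exact Or.inl (List.eq_of_mem_replicate h)
          · exact Or.inr h
  termination_by s => s.length
  decreasing_by
    simp only [List.length_cons]
    exact Nat.lt_succ_of_le (List.Sublist.length_le (List.dropWhile_sublist _))

lemma pv_main (l : List String) : stringForNamesList l = stringForNamesList_alt l := by
  obtain ⟨ks, hg, hlt, hmem⟩ := pv_groupRuns_spec (PySem.List.sorted l (fun x => x) false)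
      (PySem.List.sorted_pairwise l (fun x => x))
  have hperm : (PySem.List.sorted l (fun x => x) false).Perm l :=
    PySem.List.sorted_perm l (fun x => x) false
  have hksnd : ks.Nodup := List.Pairwise.imp ne_of_lt hlt
  have hmem' : ∀ k, k ∈ ks ↔ k ∈ PySem.Set.ofList l := by
    intro k
    rw [hmem, PySem.Set.mem_ofList, hperm.mem_iff]
  have hkperm : ks.Perm (PySem.Set.ofList l) :=
    (List.perm_ext_iff_of_nodup hksnd (PySem.Set.nodup_ofList l)).mpr hmem'
  have hsortedkeys : PySem.List.sorted (PySem.Set.ofList l) (fun x => x) false = ks :=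
    PySem.List.sorted_eq_of_perm_of_pairwise_lt (PySem.Set.ofList l) ks (fun x => x) hkperm hlt
  simp only [stringForNamesList, stringForNamesList_alt]
  -- B side: keys and counts of the frequency dict
  have hkeys : (l.foldl (fun d name => d.insert name (d.getD name 0 + 1))
      (PySem.Dict.empty : PySem.Dict String Int)).keys = PySem.Set.ofList l := by
    rw [PySem.Dict.keys_foldl_insert]
    rfl
  rw [hkeys, hsortedkeys]
  -- A side: collapse the index loop to a map over the groups
  rw [PySem.List.foldl_pyRange_zero_pyGetD (xs := pvGroupRuns (PySem.List.sorted l (fun x => x) false))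
        (d := []) (f := fun acc g => acc ++ [PySem.Int.toStr (PySem.List.len g) ++ " x "
            ++ PySem.List.pyGetD g 0 ""]) (init := []),
      PySem.List.foldl_append_singleton_eq_map, hg, List.map_map, List.nil_append]
  congr 1
  apply List.map_congr_left
  intro k hk
  have hkcnt : 0 < (PySem.List.sorted l (fun x => x) false).count k :=
    List.count_pos_iff.mpr ((hmem k).mp hk)
  have hcnt_eq : (PySem.List.sorted l (fun x => x) false).count k = l.count k := hperm.count_eq k
  have hgetd : (l.foldl (fun d name => d.insert name (d.getD name 0 + 1))
      (PySem.Dict.empty : PySem.Dict String Int)).getD k 0 = (l.count k : Int) := by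
    rw [PySem.Dict.getD_foldl_insert_add_one, PySem.Dict.getD_empty]
    ring
  simp only [Function.comp_apply, hgetd]
  rw [← hcnt_eq]
  congr 1
  · -- str(len(group))
    simp [PySem.List.len]
  · -- group[0]
    rcases Nat.exists_eq_add_of_lt hkcnt with ⟨n, hn⟩
    simp [PySem.List.pyGetD, PySem.List.pyGet?, PySem.List.pyIdx?, hn, List.replicate_succ]

-- ===== VERDICT (by name: the statement is the Claim_ definition above) =====
theorem stringForNamesList_spec : Claim_equal_stringForNamesList := by
  intro l _
  exact pv_main l
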